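-- pv_equiv track=rewrite | github.com/dCache/dcache | skel/share/lib/dCacheConfigure/putils/org_dcache_cfg_query.py | is_srm_door
-- ===== SOURCE A (Python) =====
-- def get_abstract_doors(cfg,door_type,siteinfo_filter):
--     output = []
--     if siteinfo_filter in cfg.keys():
--         raw_list_of_doors = cfg[siteinfo_filter].split(' ')
--         for item in raw_list_of_doors:
--             cleaned_item = item.strip()
--             if len(cleaned_item) == 0:
--                 continue
--             item_split = cleaned_item.split(':')
--             if len(item_split) == 2:
--                 output.append({'type':door_type,'host':item_split[0],'port':item_split[1]})
--             if len(item_split) == 1: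
--                 output.append({'type':door_type,'host':item_split[0]})
--     return output
--
-- def get_srm_doors(cfg):
--     return get_abstract_doors(cfg,'srm','DCACHE_DOOR_SRM')
--
-- def is_srm_door(cfg,hostname):
--     rc = False
--     doors = get_srm_doors(cfg)
--     for door in doors:
--         if door['host'] == hostname:
--             rc = True
--             break
--     return rc
-- ===== SOURCE B (Python) =====
-- def is_srm_door(cfg, hostname):
--     value = cfg.get('DCACHE_DOOR_SRM')
--     if value is None:
--         return False
--     for token in value.split(' '):
--         cleaned = token.strip()
--         if cleaned:
--             parts = cleaned.split(':')
--             if parts[0] == hostname and len(parts) <= 2: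
--                 return True
--     return False
-- ===== Notes on version B (the rewrite author's own statement) =====
-- stated objective: simpler
-- what changed: Fuses A's build-a-list-of-door-dicts pass and its separate scan pass into one streaming loop over the raw tokens with early exit, dropping the intermediate list-of-dicts representation entirely.
import Mathlib
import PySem

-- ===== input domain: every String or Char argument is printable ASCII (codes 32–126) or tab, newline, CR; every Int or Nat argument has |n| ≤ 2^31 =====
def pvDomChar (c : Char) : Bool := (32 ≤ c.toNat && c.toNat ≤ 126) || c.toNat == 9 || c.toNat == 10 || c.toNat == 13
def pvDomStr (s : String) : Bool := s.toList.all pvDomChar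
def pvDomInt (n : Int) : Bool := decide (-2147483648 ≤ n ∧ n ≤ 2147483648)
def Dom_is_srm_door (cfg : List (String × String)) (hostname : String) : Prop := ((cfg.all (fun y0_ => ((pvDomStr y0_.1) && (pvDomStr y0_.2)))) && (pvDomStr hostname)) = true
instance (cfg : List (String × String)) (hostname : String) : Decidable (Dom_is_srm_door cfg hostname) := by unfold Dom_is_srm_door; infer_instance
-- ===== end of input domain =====

-- s.split(sep) with a nonempty literal separator (exact: PySem.Str.split? is none only for sep = "")
def pvSplit (s sep : String) : List String := (PySem.Str.split? s sep).getD []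

-- B fuses A's build-a-list-of-door-dicts pass and its scan pass into one streaming
-- loop over the tokens with early exit (objective: simpler); same return value.

-- ===== PORT A =====
def get_abstract_doors (cfg : List (String × String)) (door_type : String) (siteinfo_filter : String) : List (PySem.Dict String String) :=
  let d := PySem.Dict.mk cfg
  if d.contains siteinfo_filter then
    (pvSplit ((d.get? siteinfo_filter).getD "") " ").foldl
      (fun output item =>
        let cleaned := PySem.Str.strip item
        if PySem.Str.len cleaned == 0 then output
        else
          let item_split := pvSplit cleaned ":"
          let output2 :=
            if item_split.length == 2 then
              output ++ [PySem.Dict.mk [("type", door_type),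
                                        ("host", (PySem.List.pyGet? item_split 0).getD ""),
                                        ("port", (PySem.List.pyGet? item_split 1).getD "")]]
            else output
          if item_split.length == 1 then
            output2 ++ [PySem.Dict.mk [("type", door_type),
                                       ("host", (PySem.List.pyGet? item_split 0).getD "")]]
          else output2) []
  else []

def get_srm_doors (cfg : List (String × String)) : List (PySem.Dict String String) :=
  get_abstract_doors cfg "srm" "DCACHE_DOOR_SRM"

-- the for-loop with break of A
def pvSrmScan (hostname : String) : List (PySem.Dict String String) → Bool
  | [] => false
  | door :: rest =>
      if (door.get? "host").getD "" == hostname then true else pvSrmScan hostname rest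

def is_srm_door (cfg : List (String × String)) (hostname : String) : Bool :=
  pvSrmScan hostname (get_srm_doors cfg)

-- ===== PORT B =====
def pvAltScan (hostname : String) : List String → Bool
  | [] => false
  | token :: rest =>
      let cleaned := PySem.Str.strip token
      if cleaned ≠ "" then
        let parts := pvSplit cleaned ":"
        if parts.head? == some hostname && decide (parts.length ≤ 2) then true
        else pvAltScan hostname rest
      else pvAltScan hostname rest

def is_srm_door_alt (cfg : List (String × String)) (hostname : String) : Bool :=
  match (PySem.Dict.mk cfg).get? "DCACHE_DOOR_SRM" with
  | none => false
  | some value => pvAltScan hostname (pvSplit value " ")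

-- ===== PRECONDITION & SPEC =====
def Spec_is_srm_door (cfg : List (String × String)) (hostname : String) (out : Bool) : Prop := out = is_srm_door_alt cfg hostname
instance (cfg : List (String × String)) (hostname : String) (out : Bool) : Decidable (Spec_is_srm_door cfg hostname out) := by unfold Spec_is_srm_door; infer_instance

-- ===== CLAIM (what is proved, stated in full; the proofs are below) =====
def Claim_equal_is_srm_door : Prop := ∀ (cfg : List (String × String)) (hostname : String), Dom_is_srm_door cfg hostname → Spec_is_srm_door cfg hostname (is_srm_door cfg hostname)

-- ===== LEMMAS AND PROOFS =====

theorem pvSrmScan_append (hostname : String) (xs ys : List (PySem.Dict String String)) :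
    pvSrmScan hostname (xs ++ ys) = (pvSrmScan hostname xs || pvSrmScan hostname ys) := by
  induction xs with
  | nil => simp [pvSrmScan]
  | cons d rest ih =>
      simp only [List.cons_append, pvSrmScan]
      split_ifs with h <;> simp [ih]

-- the per-token body of A's fold
def pvStep (_hostname : String) (output : List (PySem.Dict String String)) (item : String) : List (PySem.Dict String String) :=
  let cleaned := PySem.Str.strip item
  if PySem.Str.len cleaned == 0 then output
  else
    let item_split := pvSplit cleaned ":"
    let output2 :=
      if item_split.length == 2 then
        output ++ [PySem.Dict.mk [("type", "srm"),
                                  ("host", (PySem.List.pyGet? item_split 0).getD ""),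
                                  ("port", (PySem.List.pyGet? item_split 1).getD "")]]
      else output
    if item_split.length == 1 then
      output2 ++ [PySem.Dict.mk [("type", "srm"),
                                 ("host", (PySem.List.pyGet? item_split 0).getD "")]]
    else output2

-- scanning what one token contributes equals B's per-token test
theorem pvStep_scan (hostname item : String) (acc : List (PySem.Dict String String)) :
    pvSrmScan hostname (pvStep hostname acc item) =
      (pvSrmScan hostname acc ||
        (let cleaned := PySem.Str.strip item
         if cleaned ≠ "" then
           let parts := pvSplit cleaned ":"
           (parts.head? == some hostname && decide (parts.length ≤ 2))
         else false)) := by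
  simp only [pvStep]
  by_cases h0 : PySem.Str.strip item = ""
  · simp [h0, PySem.Str.len]
  · have hlen : (PySem.Str.len (PySem.Str.strip item) == 0) = false := by
      simp [PySem.Str.len]
      intro h
      exact absurd (String.toList_inj.mp (by simp [h])) h0
    simp only [hlen, Bool.false_eq_true, if_false, if_pos h0]
    generalize pvSplit (PySem.Str.strip item) ":" = parts
    match parts with
    | [] => simp
    | [a] =>
        simp [pvSrmScan_append, pvSrmScan, PySem.List.pyGet?, PySem.List.pyIdx?,
              PySem.Dict.get?, beq_eq_decide]
    | [a, b] =>
        simp [pvSrmScan_append, pvSrmScan, PySem.List.pyGet?, PySem.List.pyIdx?,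
              PySem.Dict.get?, beq_eq_decide]
    | a :: b :: c :: rest =>
        simp

theorem pvFold_scan (hostname : String) (tokens : List String) (acc : List (PySem.Dict String String)) :
    pvSrmScan hostname (tokens.foldl (pvStep hostname) acc) =
      (pvSrmScan hostname acc || pvAltScan hostname tokens) := by
  induction tokens generalizing acc with
  | nil => simp [pvAltScan]
  | cons t ts ih =>
      rw [List.foldl_cons, ih, pvStep_scan]
      simp only [pvAltScan]
      by_cases hne : PySem.Str.strip t = ""
      · simp [hne]
      · cases hcond : ((pvSplit (PySem.Str.strip t) ":").head? == some hostname
            && decide ((pvSplit (PySem.Str.strip t) ":").length ≤ 2)) <;>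
          simp [hne]

-- ===== VERDICT (by name: the statement is the Claim_ definition above) =====
theorem is_srm_door_spec : Claim_equal_is_srm_door := by
  intro cfg hostname _
  unfold Spec_is_srm_door is_srm_door is_srm_door_alt get_srm_doors get_abstract_doors
  cases hk : (PySem.Dict.mk cfg).get? "DCACHE_DOOR_SRM" with
  | none => simp [PySem.Dict.contains_eq_isSome_get?, hk, pvSrmScan]
  | some v =>
      simp only [PySem.Dict.contains_eq_isSome_get?, hk, Option.isSome_some, if_true,
        Option.getD_some]
      have h := pvFold_scan hostname (pvSplit v " ") []
      rw [show (pvSrmScan hostname [] : Bool) = false from rfl, Bool.false_or] at h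
      exact h
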